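-- pv_equiv track=rewrite | github.com/DIG-Network/proof_research | sub-problems/verifier-oracle-model/experiments/adaptive-coordinate-or-pair-nor-or-partition-equivalence/script.py | build_coord_partition_masks
-- ===== SOURCE A (Python) =====
-- N = 10
--
-- def build_coord_partition_masks(masks: list[int]) -> list[tuple[int, int]]:
--     out: list[tuple[int, int]] = []
--     for i in range(N):
--         b0 = 0
--         b1 = 0
--         for k, m in enumerate(masks):
--             if (m >> i) & 1:
--                 b1 |= 1 << k
--             else:
--                 b0 |= 1 << k
--         out.append((b0, b1))
--     return out
-- ===== SOURCE B (Python) =====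
-- N = 10
--
-- def build_coord_partition_masks(masks: list[int]) -> list[tuple[int, int]]:
--     # One pass over the masks (instead of N passes), building the transposed
--     # columns back-to-front Horner-style; same return value as the original.
--     b0 = [0] * N
--     b1 = [0] * N
--     for m in reversed(masks):
--         for i in range(N):
--             bit = (m >> i) & 1
--             b1[i] = (b1[i] << 1) | bit
--             b0[i] = (b0[i] << 1) | (1 - bit)
--     return list(zip(b0, b1))
-- ===== Notes on version B (the rewrite author's own statement) =====
-- stated objective: alternative
-- what changed: Instead of A's 10 passes over the masks (one per coordinate, OR-ing 1<<k per mask), B makes a single reversed pass over the masks, building all 10 transposed bit columns Horner-style (b = (b<<1)|bit) and zipping the b0/b1 column lists at the end.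
import Mathlib
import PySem

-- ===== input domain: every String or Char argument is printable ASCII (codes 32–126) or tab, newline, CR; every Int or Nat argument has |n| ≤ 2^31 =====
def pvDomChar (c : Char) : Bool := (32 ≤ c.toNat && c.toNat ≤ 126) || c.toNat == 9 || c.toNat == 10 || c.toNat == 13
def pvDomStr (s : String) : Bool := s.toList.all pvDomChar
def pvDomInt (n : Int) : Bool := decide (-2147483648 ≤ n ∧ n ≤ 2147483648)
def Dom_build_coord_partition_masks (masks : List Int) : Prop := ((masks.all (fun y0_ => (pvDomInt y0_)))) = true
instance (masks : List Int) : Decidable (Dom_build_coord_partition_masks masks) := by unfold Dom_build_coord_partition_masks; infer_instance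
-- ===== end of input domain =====

-- B replaces A's 10 passes over the masks by a single reversed pass that builds the
-- transposed bit columns Horner-style (b = 2*b | bit), zipping the two column lists at
-- the end; same return value ('alternative' objective, no speed claim).

-- ===== PORT A =====
def build_coord_partition_masks (masks : List Int) : List (Int × Int) :=
  (List.range 10).foldl (fun (out : List (Int × Int)) (i : Nat) =>
    out ++ [(PySem.List.enumerate masks).foldl
      (fun (p : Int × Int) (km : Int × Int) =>
        if PySem.Int.band (km.2 >>> i) 1 ≠ 0 then
          (p.1, PySem.Int.bor p.2 ((1:Int) <<< km.1.toNat))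
        else
          (PySem.Int.bor p.1 ((1:Int) <<< km.1.toNat), p.2))
      ((0:Int), (0:Int))]) []

-- ===== PORT B =====
def build_coord_partition_masks_alt (masks : List Int) : List (Int × Int) :=
  let st := masks.reverse.foldl (fun (st : List Int × List Int) (m : Int) =>
    ((PySem.List.enumerate st.1).map (fun (ib : Int × Int) =>
        PySem.Int.bor (ib.2 <<< (1:Nat)) (1 - PySem.Int.band (m >>> ib.1.toNat) 1)),
     (PySem.List.enumerate st.2).map (fun (ib : Int × Int) =>
        PySem.Int.bor (ib.2 <<< (1:Nat)) (PySem.Int.band (m >>> ib.1.toNat) 1))))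
    (List.replicate 10 (0:Int), List.replicate 10 (0:Int))
  st.1.zip st.2

-- ===== PRECONDITION & SPEC =====
def Spec_build_coord_partition_masks (masks : List Int) (out : List (Int × Int)) : Prop := out = build_coord_partition_masks_alt masks
instance (masks : List Int) (out : List (Int × Int)) : Decidable (Spec_build_coord_partition_masks masks out) := by unfold Spec_build_coord_partition_masks; infer_instance

-- ===== CLAIM (what is proved, stated in full; the proofs are below) =====
def Claim_equal_build_coord_partition_masks : Prop := ∀ (masks : List Int), Dom_build_coord_partition_masks masks → Spec_build_coord_partition_masks masks (build_coord_partition_masks masks)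

-- ===== LEMMAS AND PROOFS =====

-- the bit of m at position i, as both programs compute it
def pvBit (m : Int) (i : Nat) : Int := PySem.Int.band (m >>> i) 1

-- little-endian values of coordinate column i (1-bits resp. 0-bits)
def pvV1 (i : Nat) : List Int → Int
  | [] => 0
  | m :: t => pvBit m i + 2 * pvV1 i t

def pvV0 (i : Nat) : List Int → Int
  | [] => 0
  | m :: t => (1 - pvBit m i) + 2 * pvV0 i t

theorem pvBit01 (m : Int) (i : Nat) : pvBit m i = 0 ∨ pvBit m i = 1 := by
  unfold pvBit PySem.Int.band
  simp only [Int.toNat_one]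
  split_ifs with h1 h2 h3
  · have := Nat.and_one_is_mod (m >>> i).toNat
    omega
  · omega
  · have h := Nat.and_one_is_mod (-(m >>> i) - 1).toNat
    rw [Nat.land_comm] at h
    omega
  · omega

theorem pvV1_bounds (i : Nat) (ms : List Int) : 0 ≤ pvV1 i ms ∧ pvV1 i ms < 2 ^ ms.length := by
  induction ms with
  | nil => simp [pvV1]
  | cons m t ih =>
    rcases pvBit01 m i with h | h <;>
      simp only [pvV1, List.length_cons, pow_succ, h] <;> omega

theorem pvV0_bounds (i : Nat) (ms : List Int) : 0 ≤ pvV0 i ms ∧ pvV0 i ms < 2 ^ ms.length := by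
  induction ms with
  | nil => simp [pvV0]
  | cons m t ih =>
    rcases pvBit01 m i with h | h <;>
      simp only [pvV0, List.length_cons, pow_succ, h] <;> omega

theorem nat_or_pow (k : Nat) : ∀ b : Nat, b < 2 ^ k → b ||| 2 ^ k = b + 2 ^ k := by
  induction k with
  | zero => intro b hb; interval_cases b; decide
  | succ k ih =>
    intro b hb
    have hd : Nat.bit b.bodd b.div2 = b := Nat.bit_bodd_div2 b
    have hp : (2 : Nat) ^ (k + 1) = Nat.bit false (2 ^ k) := by
      simp [Nat.bit_val, pow_succ]; ring
    have hdiv : b.div2 < 2 ^ k := by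
      have : b.div2 = b / 2 := Nat.div2_val b
      omega
    calc b ||| 2 ^ (k + 1)
        = Nat.bit b.bodd b.div2 ||| Nat.bit false (2 ^ k) := by rw [hd, ← hp]
      _ = Nat.bit (b.bodd || false) (b.div2 ||| 2 ^ k) := Nat.lor_bit _ _ _ _
      _ = Nat.bit b.bodd (b.div2 + 2 ^ k) := by rw [ih _ hdiv, Bool.or_false]
      _ = b + 2 ^ (k + 1) := by
          simp only [Nat.bit_val] at hd ⊢
          omega

theorem nat_or_low (n c : Nat) (hc : c ≤ 1) : (2 * n) ||| c = 2 * n + c := by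
  interval_cases c
  · simp
  · have h2 : 2 * n = Nat.bit false n := by simp [Nat.bit_val]
    have h1 : (1 : Nat) = Nat.bit true 0 := rfl
    rw [h2, h1, Nat.lor_bit]
    simp [Nat.bit_val]

theorem int_or_pow (b : Int) (n : Nat) (h0 : 0 ≤ b) (h : b < 2 ^ n) :
    PySem.Int.bor b ((1:Int) <<< n) = b + 2 ^ n := by
  have hs : ((1:Int) <<< n) = 2 ^ n := by simp [Int.shiftLeft_eq]
  rw [hs, PySem.Int.bor_of_nonneg h0 (by positivity)]
  have ht : ((2:Int) ^ n).toNat = 2 ^ n := by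
    rw [show ((2:Int) ^ n) = ((2 ^ n : Nat) : Int) by push_cast; ring]
    exact Int.toNat_natCast _
  rw [ht, nat_or_pow n b.toNat (by omega)]
  push_cast
  omega

theorem int_or_low (b c : Int) (h0 : 0 ≤ b) (hc : c = 0 ∨ c = 1) :
    PySem.Int.bor (b <<< (1:Nat)) c = 2 * b + c := by
  have hs : b <<< (1:Nat) = 2 * b := by simp [Int.shiftLeft_eq]; ring
  rw [hs, PySem.Int.bor_of_nonneg (by omega) (by omega)]
  have : (2 * b).toNat = 2 * b.toNat := by omega
  rw [this, nat_or_low b.toNat c.toNat (by omega)]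
  omega

theorem foldl_snoc_map {α β : Type} (c : α → β) (l : List α) : ∀ acc : List β,
    l.foldl (fun out i => out ++ [c i]) acc = acc ++ l.map c := by
  induction l with
  | nil => intro acc; simp
  | cons x t ih => intro acc; simp [ih]

-- ===== A side =====

theorem a_inner (i : Nat) (ms : List Int) : ∀ (n : Nat) (b0 b1 : Int),
    0 ≤ b0 → b0 < 2 ^ n → 0 ≤ b1 → b1 < 2 ^ n →
    (PySem.List.enumerate ms (n : Int)).foldl
      (fun (p : Int × Int) (km : Int × Int) =>
        if PySem.Int.band (km.2 >>> i) 1 ≠ 0 then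
          (p.1, PySem.Int.bor p.2 ((1:Int) <<< km.1.toNat))
        else
          (PySem.Int.bor p.1 ((1:Int) <<< km.1.toNat), p.2))
      (b0, b1)
    = (b0 + 2 ^ n * pvV0 i ms, b1 + 2 ^ n * pvV1 i ms) := by
  induction ms with
  | nil =>
    intro n b0 b1 _ _ _ _
    simp [PySem.List.enumerate_nil, pvV0, pvV1]
  | cons m t ih =>
    intro n b0 b1 h00 h01 h10 h11
    have hcast : ((n : Int) + 1) = ((n + 1 : Nat) : Int) := by push_cast; ring
    have htn : ((n : Int)).toNat = n := Int.toNat_natCast n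
    have hpow : (0:Int) < 2 ^ n := by positivity
    have hpow1 : (2:Int) ^ (n+1) = 2 * 2 ^ n := by ring
    rcases pvBit01 m i with hb | hb
    · have hband : PySem.Int.band (m >>> i) 1 = 0 := hb
      simp only [PySem.List.enumerate_cons, List.foldl_cons, hband, ne_eq,
        not_true_eq_false, if_false, htn, hcast]
      rw [int_or_pow b0 n h00 h01]
      rw [ih (n+1) (b0 + 2 ^ n) b1 (by omega) (by omega) (by omega) (by omega)]
      simp only [pvV0, pvV1, hb]
      simp only [Prod.mk.injEq]
      exact ⟨by ring, by ring⟩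
    · have hband : PySem.Int.band (m >>> i) 1 = 1 := hb
      simp only [PySem.List.enumerate_cons, List.foldl_cons, hband, ne_eq,
        one_ne_zero, not_false_eq_true, if_pos, htn, hcast]
      rw [int_or_pow b1 n h10 h11]
      rw [ih (n+1) b0 (b1 + 2 ^ n) (by omega) (by omega) (by omega) (by omega)]
      simp only [pvV0, pvV1, hb]
      simp only [Prod.mk.injEq]
      exact ⟨by ring, by ring⟩

theorem a_eq_map (masks : List Int) :
    build_coord_partition_masks masks
    = (List.range 10).map (fun i => (pvV0 i masks, pvV1 i masks)) := by
  unfold build_coord_partition_masks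
  rw [foldl_snoc_map]
  simp only [List.nil_append]
  refine List.map_congr_left (fun i _ => ?_)
  have h := a_inner i masks 0 0 0 le_rfl (by norm_num) le_rfl (by norm_num)
  simp only [Nat.cast_zero, pow_zero] at h
  rw [h]
  simp

-- ===== B side =====

def pvStep (m : Int) (st : List Int × List Int) : List Int × List Int :=
  ((PySem.List.enumerate st.1).map (fun (ib : Int × Int) =>
      PySem.Int.bor (ib.2 <<< (1:Nat)) (1 - PySem.Int.band (m >>> ib.1.toNat) 1)),
   (PySem.List.enumerate st.2).map (fun (ib : Int × Int) =>
      PySem.Int.bor (ib.2 <<< (1:Nat)) (PySem.Int.band (m >>> ib.1.toNat) 1)))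

theorem pvStep_map (m : Int) (f g : Nat → Int) :
    pvStep m ((List.range 10).map f, (List.range 10).map g)
    = ((List.range 10).map (fun i => PySem.Int.bor (f i <<< (1:Nat)) (1 - pvBit m i)),
       (List.range 10).map (fun i => PySem.Int.bor (g i <<< (1:Nat)) (pvBit m i))) := by
  have h : List.range 10 = [0,1,2,3,4,5,6,7,8,9] := rfl
  simp [pvStep, pvBit, h, PySem.List.enumerate]

theorem b_fold (ms : List Int) : ∀ (f g : Nat → Int),
    ms.foldl (fun st m => pvStep m st) ((List.range 10).map f, (List.range 10).map g)
    = ((List.range 10).map (fun i => ms.foldl (fun b m => PySem.Int.bor (b <<< (1:Nat)) (1 - pvBit m i)) (f i)),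
       (List.range 10).map (fun i => ms.foldl (fun b m => PySem.Int.bor (b <<< (1:Nat)) (pvBit m i)) (g i))) := by
  induction ms with
  | nil => intro f g; simp
  | cons m t ih =>
    intro f g
    rw [List.foldl_cons, pvStep_map, ih]
    simp only [List.foldl_cons]

theorem hor1_rev (i : Nat) (ms : List Int) :
    ms.reverse.foldl (fun b m => PySem.Int.bor (b <<< (1:Nat)) (pvBit m i)) 0 = pvV1 i ms := by
  induction ms with
  | nil => rfl
  | cons m t ih =>
    rw [List.reverse_cons, List.foldl_append, ih]
    simp only [List.foldl_cons, List.foldl_nil]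
    rw [int_or_low _ _ (pvV1_bounds i t).1 (pvBit01 m i)]
    simp only [pvV1]; ring

theorem hor0_rev (i : Nat) (ms : List Int) :
    ms.reverse.foldl (fun b m => PySem.Int.bor (b <<< (1:Nat)) (1 - pvBit m i)) 0 = pvV0 i ms := by
  induction ms with
  | nil => rfl
  | cons m t ih =>
    rw [List.reverse_cons, List.foldl_append, ih]
    simp only [List.foldl_cons, List.foldl_nil]
    have hc : (1 : Int) - pvBit m i = 0 ∨ (1 : Int) - pvBit m i = 1 := by
      rcases pvBit01 m i with h | h <;> [right; left] <;> omega
    rw [int_or_low _ _ (pvV0_bounds i t).1 hc]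
    simp only [pvV0]; ring

theorem b_eq_map (masks : List Int) :
    build_coord_partition_masks_alt masks
    = (List.range 10).map (fun i => (pvV0 i masks, pvV1 i masks)) := by
  show ((masks.reverse.foldl (fun st m => pvStep m st)
      (List.replicate 10 (0:Int), List.replicate 10 (0:Int))).1.zip
    (masks.reverse.foldl (fun st m => pvStep m st)
      (List.replicate 10 (0:Int), List.replicate 10 (0:Int))).2) = _
  have hrep : List.replicate 10 (0:Int) = (List.range 10).map (fun _ => (0:Int)) := by
    rw [List.map_const', List.length_range]
  rw [hrep, b_fold masks.reverse (fun _ => 0) (fun _ => 0)]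
  rw [List.zip_map']
  refine List.map_congr_left (fun i _ => ?_)
  rw [hor0_rev, hor1_rev]

-- ===== VERDICT (by name: the statement is the Claim_ definition above) =====
theorem build_coord_partition_masks_spec : Claim_equal_build_coord_partition_masks := by
  intro masks _
  show _ = _
  rw [a_eq_map, b_eq_map]
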